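-- pv_equiv track=rewrite | github.com/rachapol007/Challenges | Asana/tasks_Types.py | tasksTypes
-- ===== SOURCE A (Python) =====
-- def tasksTypes(deadlines, day):
--   label = list()
--   upcoming = 0
--   later = 0
--   count = 0
--   task = 0
--
--   for i in range(len(deadlines)):
--     if deadlines[i] <= day:
--        task += 1
--     if deadlines[i] > day and deadlines[i] <= day + 7:
--        upcoming += 1
--     if deadlines[i] > day + 7:
--        later += 1
--
--   label.append(task)
--   label.append(upcoming)
--   label.append(later)
--   return label
-- ===== SOURCE B (Python) =====
-- def _bisect_right(s, x):
--     lo = 0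
--     hi = len(s)
--     while lo < hi:
--         mid = (lo + hi) // 2
--         if x < s[mid]:
--             hi = mid
--         else:
--             lo = mid + 1
--     return lo
--
--
-- def tasksTypes(deadlines, day):
--     s = sorted(deadlines)
--     task = _bisect_right(s, day)
--     cut = _bisect_right(s, day + 7)
--     return [task, cut - task, len(s) - cut]
-- ===== Notes on version B (the rewrite author's own statement) =====
-- stated objective: alternative
-- what changed: Replace the single scan that tests every deadline against three conditions by sort-then-binary-search: sort a copy of the deadlines and locate the two bucket boundaries with bisect_right, deriving the three counts from the boundary indices.
import Mathlib
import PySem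

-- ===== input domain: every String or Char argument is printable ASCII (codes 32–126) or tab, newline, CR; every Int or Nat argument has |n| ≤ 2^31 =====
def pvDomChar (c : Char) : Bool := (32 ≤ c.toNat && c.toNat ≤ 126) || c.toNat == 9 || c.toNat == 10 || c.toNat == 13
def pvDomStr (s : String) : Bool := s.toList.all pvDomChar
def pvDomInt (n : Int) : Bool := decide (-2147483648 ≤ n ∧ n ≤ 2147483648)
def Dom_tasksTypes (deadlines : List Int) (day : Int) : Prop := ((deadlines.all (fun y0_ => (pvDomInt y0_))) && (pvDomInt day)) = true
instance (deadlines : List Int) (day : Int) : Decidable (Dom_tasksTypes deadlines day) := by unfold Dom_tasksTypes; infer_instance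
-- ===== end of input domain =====

-- B replaces A's three-way scan by sort-then-binary-search (bisect_right at the two
-- bucket boundaries, counts derived from the indices); alternative decomposition, no speed claim.

-- ===== PORT A =====
-- for i in range(len(deadlines)): three independent if-tests updating task/upcoming/later
def tasksTypes (deadlines : List Int) (day : Int) : List Int :=
  let st :=
    (PySem.List.pyRange 0 (PySem.List.len deadlines)).foldl
      (fun (acc : Int × Int × Int) i =>
        let x := PySem.List.pyGetD deadlines i 0   -- deadlines[i]; i is always in range
        let task := if x ≤ day then acc.1 + 1 else acc.1
        let upcoming := if x > day ∧ x ≤ day + 7 then acc.2.1 + 1 else acc.2.1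
        let later := if x > day + 7 then acc.2.2 + 1 else acc.2.2
        (task, upcoming, later))
      (0, 0, 0)
  [st.1, st.2.1, st.2.2]

-- ===== PORT B =====
-- s = sorted(deadlines); Source B's hand-written _bisect_right is exactly CPython's
-- bisect_right loop, which is PySem.List.bisectRight (same lo/hi/mid recursion)
def tasksTypes_alt (deadlines : List Int) (day : Int) : List Int :=
  let s := PySem.List.sorted deadlines (fun x => x) false
  let task := PySem.List.bisectRight s day
  let cut := PySem.List.bisectRight s (day + 7)
  [(task : Int), (cut : Int) - (task : Int), (s.length : Int) - (cut : Int)]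

-- ===== PRECONDITION & SPEC =====
def Spec_tasksTypes (deadlines : List Int) (day : Int) (out : List Int) : Prop := out = tasksTypes_alt deadlines day
instance (deadlines : List Int) (day : Int) (out : List Int) : Decidable (Spec_tasksTypes deadlines day out) := by unfold Spec_tasksTypes; infer_instance

-- ===== CLAIM (what is proved, stated in full; the proofs are below) =====
def Claim_equal_tasksTypes : Prop := ∀ (deadlines : List Int) (day : Int), Dom_tasksTypes deadlines day → Spec_tasksTypes deadlines day (tasksTypes deadlines day)

-- ===== LEMMAS AND PROOFS =====

-- a predicate that is true exactly below an index threshold is counted by the threshold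
theorem countP_eq_of_threshold (s : List Int) (p : Int → Bool) (k : Nat)
    (hle : k ≤ s.length)
    (hlt : ∀ (j : Nat) (hj : j < s.length), j < k → p s[j] = true)
    (hgt : ∀ (j : Nat) (hj : j < s.length), k ≤ j → p s[j] = false) :
    s.countP p = k := by
  induction s generalizing k with
  | nil => simp_all
  | cons a t ih =>
    cases k with
    | zero =>
      rw [List.countP_eq_zero.mpr]
      intro b hb
      obtain ⟨j, hj, rfl⟩ := List.getElem_of_mem hb
      simpa using hgt j hj (Nat.zero_le j)
    | succ k' =>
      have ha : p a = true := hlt 0 (by simp) (by omega)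
      rw [List.countP_cons, ha, ih k' (by simpa using hle)
        (fun j hj hjk => by have := hlt (j+1) (by simp only [List.length_cons]; exact Nat.succ_lt_succ hj) (by omega); simpa using this)
        (fun j hj hjk => by have := hgt (j+1) (by simp only [List.length_cons]; exact Nat.succ_lt_succ hj) (by omega); simpa using this)]
      simp

-- bisect_right on the sorted copy counts the deadlines ≤ x
theorem bisectRight_sorted_eq_countP (d : List Int) (x : Int) :
    PySem.List.bisectRight (PySem.List.sorted d (fun y => y) false) x
      = d.countP (fun a => decide (a ≤ x)) := by
  set s := PySem.List.sorted d (fun y => y) false with hs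
  have hpw : s.Pairwise (fun a b => a ≤ b) := PySem.List.sorted_pairwise d (fun y => y)
  obtain ⟨hle, hlt, hgt⟩ := PySem.List.bisectRight_spec s x hpw
  have hcount : s.countP (fun a => decide (a ≤ x)) = PySem.List.bisectRight s x := by
    apply countP_eq_of_threshold s _ _ hle
    · intro j hj hjk
      simpa using hlt j hj hjk
    · intro j hj hjk
      have := hgt j hj hjk
      simp only [decide_eq_false_iff_not]
      omega
  have hperm : s.Perm d := PySem.List.sorted_perm d (fun y => y) false
  rw [← hperm.countP_eq]
  omega

-- A's loop, rebased onto the list itself, computed componentwise as three counts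
theorem foldA_eq (day : Int) (d : List Int) (t u l : Int) :
    d.foldl
      (fun (acc : Int × Int × Int) x =>
        let task := if x ≤ day then acc.1 + 1 else acc.1
        let upcoming := if x > day ∧ x ≤ day + 7 then acc.2.1 + 1 else acc.2.1
        let later := if x > day + 7 then acc.2.2 + 1 else acc.2.2
        (task, upcoming, later))
      (t, u, l)
    = (t + (d.countP (fun a => decide (a ≤ day)) : Int),
       u + (d.countP (fun a => decide (day < a) && decide (a ≤ day + 7)) : Int),
       l + (d.countP (fun a => decide (day + 7 < a)) : Int)) := by
  induction d generalizing t u l with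
  | nil => simp
  | cons x xs ih =>
    simp only [List.foldl_cons, List.countP_cons, ih, Prod.mk.injEq]
    simp only [Bool.and_eq_true, decide_eq_true_eq]
    refine ⟨?_, ?_, ?_⟩ <;> split_ifs <;> push_cast <;> omega

-- counting arithmetic between A's three predicates and B's two boundaries
theorem count_arith (day : Int) (d : List Int) :
    d.countP (fun a => decide (a ≤ day + 7))
      = d.countP (fun a => decide (a ≤ day))
        + d.countP (fun a => decide (day < a) && decide (a ≤ day + 7))
    ∧ d.length
      = d.countP (fun a => decide (a ≤ day + 7))
        + d.countP (fun a => decide (day + 7 < a)) := by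
  induction d with
  | nil => simp
  | cons x xs ih =>
    obtain ⟨ih1, ih2⟩ := ih
    simp only [List.countP_cons, List.length_cons]
    constructor <;> split_ifs <;> simp_all <;> omega

-- A's range(len(..)) loop over indices equals the same loop over the list itself
theorem loopA_eq (deadlines : List Int) (day : Int) :
    (PySem.List.pyRange 0 (PySem.List.len deadlines)).foldl
      (fun (acc : Int × Int × Int) i =>
        (if PySem.List.pyGetD deadlines i 0 ≤ day then acc.1 + 1 else acc.1,
         if PySem.List.pyGetD deadlines i 0 > day ∧ PySem.List.pyGetD deadlines i 0 ≤ day + 7 then acc.2.1 + 1 else acc.2.1,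
         if PySem.List.pyGetD deadlines i 0 > day + 7 then acc.2.2 + 1 else acc.2.2))
      (0, 0, 0)
    = deadlines.foldl
      (fun (acc : Int × Int × Int) x =>
        (if x ≤ day then acc.1 + 1 else acc.1,
         if x > day ∧ x ≤ day + 7 then acc.2.1 + 1 else acc.2.1,
         if x > day + 7 then acc.2.2 + 1 else acc.2.2))
      (0, 0, 0) := by
  simpa using PySem.List.foldl_pyRange_pyGetD deadlines 0
    (fun (acc : Int × Int × Int) x =>
      (if x ≤ day then acc.1 + 1 else acc.1,
       if x > day ∧ x ≤ day + 7 then acc.2.1 + 1 else acc.2.1,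
       if x > day + 7 then acc.2.2 + 1 else acc.2.2))
    (0, 0, 0) le_rfl

-- ===== VERDICT (by name: the statement is the Claim_ definition above) =====
theorem tasksTypes_spec : Claim_equal_tasksTypes := by
  intro deadlines day _
  unfold Spec_tasksTypes
  simp only [tasksTypes, tasksTypes_alt]
  rw [loopA_eq]
  have hf := foldA_eq day deadlines 0 0 0
  simp only at hf
  rw [hf]
  rw [bisectRight_sorted_eq_countP, bisectRight_sorted_eq_countP]
  have hlen : (PySem.List.sorted deadlines (fun y => y) false).length = deadlines.length :=
    (PySem.List.sorted_perm deadlines (fun y => y) false).length_eq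
  obtain ⟨h1, h2⟩ := count_arith day deadlines
  simp only [hlen, List.cons.injEq, and_true]
  refine ⟨by omega, by omega, by omega⟩
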